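-- pv_equiv track=rewrite | github.com/AnaBeatrizOliveira005/ATP2022 | TPC6/Aulan6.py | distNP
-- ===== SOURCE A (Python) =====
-- def distNP(obras):
--     d0= {}
--     for nome, _, _, periodo, *_ in obras:
--         if periodo in d0.keys():
--             d0[periodo].append(nome)
--         else:
--             d0[periodo] = [nome]
--     return d0
-- ===== SOURCE B (Python) =====
-- def distNP(obras):
--     # Two passes: first the distinct periods in first-occurrence order,
--     # then one comprehension per period collecting that period's names.
--     periodos = dict.fromkeys(periodo for _, _, _, periodo, *_ in obras)
--     return {p: [nome for nome, _, _, q, *_ in obras if q == p] for p in periodos}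
-- ===== Notes on version B (the rewrite author's own statement) =====
-- stated objective: alternative
-- what changed: Replaces the single-pass dict-bucket accumulation with a two-phase scheme: first deduplicate the periods in first-occurrence order (dict.fromkeys), then build the result with one filtering comprehension per distinct period.
import Mathlib
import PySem

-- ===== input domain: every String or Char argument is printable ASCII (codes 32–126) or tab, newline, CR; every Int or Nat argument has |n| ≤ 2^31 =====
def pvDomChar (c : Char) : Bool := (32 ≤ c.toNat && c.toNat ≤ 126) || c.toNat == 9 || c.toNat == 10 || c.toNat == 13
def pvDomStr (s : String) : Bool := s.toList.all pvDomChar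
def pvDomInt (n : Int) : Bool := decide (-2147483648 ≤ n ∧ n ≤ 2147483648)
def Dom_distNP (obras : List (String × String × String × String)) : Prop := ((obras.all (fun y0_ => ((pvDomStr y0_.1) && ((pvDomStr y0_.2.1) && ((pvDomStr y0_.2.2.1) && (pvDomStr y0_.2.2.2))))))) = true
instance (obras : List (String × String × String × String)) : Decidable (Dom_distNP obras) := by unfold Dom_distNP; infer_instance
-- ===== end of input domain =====

-- B replaces A's single-pass dict-bucket grouping by a two-phase scheme (dedup the
-- periods in first-occurrence order, then one filter pass per distinct period);
-- genuinely different traversal shape, same exact result ("alternative", not faster).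


-- ===== PORT A =====
-- A: d0 = {}; for nome,_,_,periodo in obras: if periodo in d0: d0[periodo].append(nome) else d0[periodo] = [nome]; return d0
def distNP (obras : List (String × String × String × String)) : List (String × List String) :=
  (obras.foldl (fun d0 r =>
      if d0.contains r.2.2.2 then
        d0.modify r.2.2.2 [] (fun l => l ++ [r.1])   -- d0[periodo].append(nome)
      else
        d0.insert r.2.2.2 [r.1])                     -- d0[periodo] = [nome]
    (PySem.Dict.empty : PySem.Dict String (List String))).items

-- ===== PORT B =====
-- B: periodos = dict.fromkeys(period column); {p: [nome for rows with that period] for p in periodos}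
def distNP_alt (obras : List (String × String × String × String)) : List (String × List String) :=
  let periodos := PySem.List.dedup (obras.map (fun r => r.2.2.2))
  periodos.map (fun p => (p, (obras.filter (fun r => r.2.2.2 == p)).map (fun r => r.1)))

-- ===== PRECONDITION & SPEC =====
def Spec_distNP (obras : List (String × String × String × String)) (out : List (String × List String)) : Prop := out = distNP_alt obras
instance (obras : List (String × String × String × String)) (out : List (String × List String)) : Decidable (Spec_distNP obras out) := by unfold Spec_distNP; infer_instance

-- ===== CLAIM (what is proved, stated in full; the proofs are below) =====
def Claim_equal_distNP : Prop := ∀ (obras : List (String × String × String × String)), Dom_distNP obras → Spec_distNP obras (distNP obras)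

-- ===== LEMMAS AND PROOFS =====

-- A's two-branch loop body is exactly a `modify` with default [] (new keys append with [nome]).
theorem distNP_step_eq_modify (d : PySem.Dict String (List String)) (r : String × String × String × String) :
    (if d.contains r.2.2.2 then d.modify r.2.2.2 [] (fun l => l ++ [r.1])
     else d.insert r.2.2.2 [r.1])
      = d.modify r.2.2.2 [] (fun l => l ++ [r.1]) := by
  by_cases h : d.contains r.2.2.2
  · simp [h]
  · simp only [Bool.not_eq_true] at h
    simp [h, PySem.Dict.modify, PySem.Dict.getD_of_not_contains _ [] h]

-- A's fold over rows IS the standard (key, name)-pair grouping fold.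
theorem distNP_foldl_eq_pairs (obras : List (String × String × String × String)) :
    obras.foldl (fun d0 r =>
        if d0.contains r.2.2.2 then d0.modify r.2.2.2 [] (fun l => l ++ [r.1])
        else d0.insert r.2.2.2 [r.1]) (PySem.Dict.empty : PySem.Dict String (List String))
      = (obras.map (fun r => (r.2.2.2, r.1))).foldl
          (fun d p => d.modify p.1 [] (fun l => l ++ [p.2])) PySem.Dict.empty := by
  rw [List.foldl_map]
  exact List.foldl_ext _ _ _ (fun d r _ => distNP_step_eq_modify d r)

theorem distNP_eq_alt (obras : List (String × String × String × String)) :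
    distNP obras = distNP_alt obras := by
  unfold distNP distNP_alt
  rw [distNP_foldl_eq_pairs]
  set pairs := obras.map (fun r => (r.2.2.2, r.1)) with hpairs
  set D := pairs.foldl (fun d p => d.modify p.1 [] (fun l => l ++ [p.2]))
      (PySem.Dict.empty : PySem.Dict String (List String)) with hD
  have hnodup : D.keys.Nodup := by
    rw [hD]
    exact PySem.Dict.nodup_keys_foldl_modify_key pairs (fun p => p.1) _ _ _
      (by simp [PySem.Dict.keys_empty])
  have hkeys : D.keys = PySem.List.dedup (obras.map (fun r => r.2.2.2)) := by
    rw [hD]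
    have h1 : pairs.foldl (fun d p => d.modify p.1 [] (fun l => l ++ [p.2]))
        (PySem.Dict.empty : PySem.Dict String (List String))
        = pairs.foldl (fun d p => d.modify ((fun q : String × String => q.1) p) [] (fun l => l ++ [p.2])) PySem.Dict.empty := rfl
    rw [h1, PySem.Dict.keys_foldl_modify_key, PySem.Dict.keys_empty,
      PySem.Set.update_nil_left, PySem.List.dedup_eq_ofList, hpairs, List.map_map]
    rfl
  have hget : ∀ p : String, D.getD p [] =
      (obras.filter (fun r => r.2.2.2 == p)).map (fun r => r.1) := by
    intro p
    rw [hD, PySem.Dict.getD_foldl_modify_append, PySem.Dict.getD_empty, hpairs,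
      List.filter_map, List.map_map]
    rfl
  rw [PySem.Dict.items_eq_map_keys D hnodup [], hkeys]
  refine List.map_congr_left (fun p _ => ?_)
  rw [hget p]

-- ===== VERDICT (by name: the statement is the Claim_ definition above) =====
theorem distNP_spec : Claim_equal_distNP := by
  intro obras _
  unfold Spec_distNP
  exact distNP_eq_alt obras
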